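-- pv_equiv track=rewrite | github.com/thu-coai/MoralDial | train_codes/mr_evaluation.py | stripstart
-- ===== SOURCE A (Python) =====
-- Sorrys = ["I'm sorry. ", "Yes, you are right. ", "I'd like to correct my answer. ", "Let me see... I think ", "After revised by you, I think ", "Sorry. "
--     "I was wrong. ", "I made a mistake. ", "Thanks for correcting. ", "Make sense! ", "That makes sense. ", "", "Good idea. "]
--
-- Small_Sorrys = ['', "Make sense. ","I also agree that ", "Yes, and "]
--
-- def stripstart(ans):
--     ans = ans.strip()
--     for sorry in Small_Sorrys+Sorrys:
--         if len(sorry)>0 and ans.startswith(sorry):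
--             ans = ans[len(sorry):]
--             if len(ans)>0:
--                 ans = ans[0].upper() + ans[1:]
--             break
--     return ans
-- ===== SOURCE B (Python) =====
-- Sorrys = ["I'm sorry. ", "Yes, you are right. ", "I'd like to correct my answer. ", "Let me see... I think ", "After revised by you, I think ", "Sorry. "
--     "I was wrong. ", "I made a mistake. ", "Thanks for correcting. ", "Make sense! ", "That makes sense. ", "", "Good idea. "]
--
-- Small_Sorrys = ['', "Make sense. ","I also agree that ", "Yes, and "]
--
-- # Index the known prefixes once by their first character; a lookup on the
-- # stripped answer's first character replaces the full linear scan.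
-- _PREFIXES = [p for p in Small_Sorrys + Sorrys if p]
-- _BUCKETS = {}
-- for _p in _PREFIXES:
--     _BUCKETS.setdefault(_p[:1], []).append(_p)
--
-- def stripstart(ans):
--     ans = ans.strip()
--     for p in _BUCKETS.get(ans[:1], []):
--         if ans.startswith(p):
--             rest = ans[len(p):]
--             return rest[:1].upper() + rest[1:]
--     return ans
-- ===== Notes on version B (the rewrite author's own statement) =====
-- stated objective: alternative
-- what changed: B builds a one-time dict indexing the known apology prefixes by their first character and, after stripping, only tests the few prefixes in the bucket of the answer's first character, instead of A's ordered linear scan over all 15 candidate prefixes with an in-loop emptiness check.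
import Mathlib
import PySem

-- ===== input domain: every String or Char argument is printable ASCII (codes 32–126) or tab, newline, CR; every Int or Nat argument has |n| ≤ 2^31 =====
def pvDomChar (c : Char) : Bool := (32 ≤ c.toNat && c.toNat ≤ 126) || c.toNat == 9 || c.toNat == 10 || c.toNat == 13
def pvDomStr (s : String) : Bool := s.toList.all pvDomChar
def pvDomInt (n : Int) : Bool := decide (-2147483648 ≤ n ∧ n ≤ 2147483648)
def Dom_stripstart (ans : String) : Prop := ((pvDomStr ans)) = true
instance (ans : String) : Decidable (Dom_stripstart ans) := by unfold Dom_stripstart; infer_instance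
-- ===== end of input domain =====

-- B replaces A's ordered scan over every known apology prefix by a first-character
-- dict index built once, so only the few prefixes sharing the answer's first
-- character are tested (objective: alternative; return values proved equal).

-- ===== PORT A =====
def pvSorrys : List String :=
  ["I'm sorry. ", "Yes, you are right. ", "I'd like to correct my answer. ",
   "Let me see... I think ", "After revised by you, I think ",
   "Sorry. I was wrong. ",  -- the two adjacent literals merge in Python
   "I made a mistake. ", "Thanks for correcting. ", "Make sense! ",
   "That makes sense. ", "", "Good idea. "]

def pvSmallSorrys : List String := ["", "Make sense. ", "I also agree that ", "Yes, and "]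

-- 'if len(ans)>0: ans = ans[0].upper() + ans[1:]' of A's loop body
def pvCapA (ans : String) : String :=
  if PySem.Str.len ans > 0 then
    match PySem.Str.pyGet? ans 0 with   -- ans[0] (guarded: len > 0)
    | some c => String.singleton (PySem.Chars.upperChar c) ++ PySem.Str.slice ans (some 1) none
    | none => ans
  else ans

-- the for-loop of A: first prefix that is non-empty and matches wins, then break
def pvLoopA : List String → String → String
  | [], ans => ans
  | sry :: rest, ans =>
    if PySem.Str.len sry > 0 && PySem.Str.startswith ans sry then
      pvCapA (PySem.Str.slice ans (some (PySem.Str.len sry : Int)) none)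
    else pvLoopA rest ans

def stripstart (ans : String) : String :=
  pvLoopA (pvSmallSorrys ++ pvSorrys) (PySem.Str.strip ans)

-- ===== PORT B =====
-- _PREFIXES = [p for p in Small_Sorrys + Sorrys if p]
def pvPrefixes : List String := (pvSmallSorrys ++ pvSorrys).filter (fun p => p != "")

-- _BUCKETS: index the prefixes once by their first character (p[:1])
def pvBuckets : PySem.Dict String (List String) :=
  pvPrefixes.foldl
    (fun d p => d.modify (PySem.Str.slice p none (some 1)) [] (· ++ [p]))
    PySem.Dict.empty

-- the for-loop of B over one bucket: return on first match
def pvScanB : List String → String → String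
  | [], ans => ans
  | p :: ps, ans =>
    if PySem.Str.startswith ans p then
      let rest := PySem.Str.slice ans (some (PySem.Str.len p : Int)) none
      PySem.Str.upper (PySem.Str.slice rest none (some 1)) ++ PySem.Str.slice rest (some 1) none
    else pvScanB ps ans

def stripstart_alt (ans : String) : String :=
  let s := PySem.Str.strip ans
  pvScanB (pvBuckets.getD (PySem.Str.slice s none (some 1)) []) s

-- ===== PRECONDITION & SPEC =====
def Spec_stripstart (ans : String) (out : String) : Prop := out = stripstart_alt ans
instance (ans : String) (out : String) : Decidable (Spec_stripstart ans out) := by unfold Spec_stripstart; infer_instance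

-- ===== CLAIM (what is proved, stated in full; the proofs are below) =====
def Claim_equal_stripstart : Prop := ∀ (ans : String), Dom_stripstart ans → Spec_stripstart ans (stripstart ans)

-- ===== LEMMAS AND PROOFS =====

-- String extensionality via toList
theorem pvStrExt (s t : String) (h : s.toList = t.toList) : s = t := by
  have := congrArg String.ofList h; simpa using this

-- s[:1] on the char level
theorem pvKeyToList (s : String) :
    (PySem.Str.slice s none (some 1)).toList = s.toList.take 1 := by
  have := PySem.List.slice_to_natCast (xs := s.toList) (b := 1)
  simp [PySem.Str.toList_slice]
  simpa using this

-- a non-empty matching prefix pins the first character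
theorem pvSwTake1 (s p : String) (hp : p ≠ "") (h : PySem.Str.startswith s p = true) :
    s.toList.take 1 = p.toList.take 1 := by
  have hpre : p.toList <+: s.toList := by
    rw [← PySem.Chars.startswith_iff]
    simpa using h
  obtain ⟨t, ht⟩ := hpre
  cases hl : p.toList with
  | nil => exact absurd (pvStrExt p "" (by simp [hl])) hp
  | cons c cs => rw [← ht, hl]; simp

theorem pvSwFalse (s p : String) (hp : p ≠ "")
    (hk : PySem.Str.slice p none (some 1) ≠ PySem.Str.slice s none (some 1)) :
    PySem.Str.startswith s p = false := by
  by_contra hne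
  have hsw : PySem.Str.startswith s p = true := by
    cases hb : PySem.Str.startswith s p
    · exact absurd hb hne
    · rfl
  exact hk (pvStrExt _ _ (by rw [pvKeyToList, pvKeyToList, pvSwTake1 s p hp hsw]))

-- A's empty-string entries never fire
theorem pvLoopA_filter_empty (L : List String) (s : String) :
    pvLoopA L s = pvLoopA (L.filter (fun p => p != "")) s := by
  induction L with
  | nil => rfl
  | cons p L ih =>
    by_cases hp : p = ""
    · subst hp
      simpa [pvLoopA, List.filter] using ih
    · have hb : (p != "") = true := by simp [hp]
      simp only [List.filter, hb, pvLoopA]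
      rw [ih]

-- prefixes whose first character differs from s's never fire
theorem pvLoopA_filter_key (L : List String) (s : String) (h : ∀ p ∈ L, p ≠ "") :
    pvLoopA L s =
      pvLoopA (L.filter (fun p => PySem.Str.slice p none (some 1) == PySem.Str.slice s none (some 1))) s := by
  induction L with
  | nil => rfl
  | cons p L ih =>
    have hp : p ≠ "" := h p (by simp)
    have ihh := ih (fun q hq => h q (by simp [hq]))
    by_cases hk : PySem.Str.slice p none (some 1) = PySem.Str.slice s none (some 1)
    · have hb : (PySem.Str.slice p none (some 1) == PySem.Str.slice s none (some 1)) = true := by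
        simp [hk]
      simp only [List.filter, hb, pvLoopA]
      rw [ihh]
    · have hb : (PySem.Str.slice p none (some 1) == PySem.Str.slice s none (some 1)) = false := by
        simp [hk]
      have hsw := pvSwFalse s p hp hk
      simp only [List.filter, hb, pvLoopA, hsw, Bool.and_false, Bool.false_eq_true, if_false]
      exact ihh

-- the two loop bodies agree
theorem pvBodyEq (r : String) :
    pvCapA r
      = PySem.Str.upper (PySem.Str.slice r none (some 1)) ++ PySem.Str.slice r (some 1) none := by
  cases hr : r.toList with
  | nil =>
    have : r = "" := pvStrExt _ _ (by simp [hr])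
    subst this; decide
  | cons c cs =>
    have hpos : PySem.Str.len r > 0 := by simp [hr]
    have hget : PySem.Str.pyGet? r 0 = some c := by simp [hr]
    unfold pvCapA
    rw [if_pos hpos, hget]
    apply pvStrExt
    have hdrop : (PySem.Str.slice r (some 1) none).toList = r.toList.drop 1 := by
      have := PySem.List.slice_from_natCast (xs := r.toList) (a := 1)
      simp [PySem.Str.toList_slice]
      simpa using this
    have htake : PySem.List.slice (c :: cs) none (some 1) = [c] := by
      simpa using PySem.List.slice_to_natCast (xs := c :: cs) (b := 1)
    simp [PySem.Str.toList_upper, hdrop, hr, htake]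
    rfl

theorem pvLoopA_eq_scanB (L : List String) (s : String) (h : ∀ p ∈ L, p ≠ "") :
    pvLoopA L s = pvScanB L s := by
  induction L with
  | nil => rfl
  | cons p L ih =>
    have hp : p ≠ "" := h p (by simp)
    have hpos : (decide (PySem.Str.len p > 0)) = true := by
      simp only [decide_eq_true_eq]
      have hne : p.toList ≠ [] := fun hnil => hp (pvStrExt p "" (by simp [hnil]))
      have h0 : p.toList.length ≠ 0 := by simpa using hne
      have h2 : p.length = p.toList.length := by simp [String.length_toList]
      simp only [PySem.Str.len]
      omega
    have ihh := ih (fun q hq => h q (by simp [hq]))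
    simp only [pvLoopA, pvScanB, hpos, Bool.true_and]
    by_cases hsw : PySem.Str.startswith s p = true
    · rw [if_pos hsw, if_pos hsw]
      exact pvBodyEq _
    · have hswf : PySem.Str.startswith s p = false := by
        cases hb : PySem.Str.startswith s p
        · rfl
        · exact absurd hb hsw
      rw [if_neg (by rw [hswf]; simp), if_neg (by rw [hswf]; simp)]
      exact ihh

-- the bucket looked up is exactly the key-filtered prefix list
theorem pvBucketEq (k : String) :
    pvBuckets.getD k [] = pvPrefixes.filter (fun p => PySem.Str.slice p none (some 1) == k) := by
  unfold pvBuckets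
  have h1 : (pvPrefixes.map (fun p => (PySem.Str.slice p none (some 1), p))).foldl
          (fun (d : PySem.Dict String (List String)) (q : String × String) =>
            d.modify q.1 [] (· ++ [q.2])) PySem.Dict.empty
      = pvPrefixes.foldl
          (fun d p => d.modify (PySem.Str.slice p none (some 1)) [] (· ++ [p]))
          PySem.Dict.empty := by
    rw [List.foldl_map]
  rw [← h1, PySem.Dict.getD_foldl_modify_append]
  simp [List.filter_map, Function.comp_def]

-- ===== VERDICT (by name: the statement is the Claim_ definition above) =====
theorem pvMain (s : String) :
    pvLoopA (pvSmallSorrys ++ pvSorrys) s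
      = pvScanB (pvBuckets.getD (PySem.Str.slice s none (some 1)) []) s := by
  rw [pvLoopA_filter_empty, pvBucketEq]
  show pvLoopA pvPrefixes s = _
  rw [pvLoopA_filter_key pvPrefixes s (by decide)]
  refine pvLoopA_eq_scanB _ s ?_
  intro p hp
  have hmem : p ∈ pvPrefixes := List.mem_of_mem_filter hp
  exact (by decide : ∀ q ∈ pvPrefixes, q ≠ "") p hmem

theorem stripstart_spec : Claim_equal_stripstart := by
  intro ans _
  exact pvMain (PySem.Str.strip ans)
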